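-- pv_equiv track=rewrite | github.com/Pan-will/LeetCode | 公司真题/百度/翻转乘法表.py | helper
-- ===== SOURCE A (Python) =====
-- def getRev_num(n):
--     if n < 10:
--         return n
--     temp = []
--     while n > 0:
--         temp.append(n % 10)
--         n = n // 10
--     res = 0
--     for num in temp:
--         res = res * 10 + num
--     return res
--
-- def helper(n):
--     if n < 1: return []
--     res = []
--     for i in range(1, n + 1):
--         temp = []
--         j = 1
--         while j <= i:
--             temp.append(getRev_num(j * i))
--             j += 1
--         res.append(temp)
--     return res
-- ===== SOURCE B (Python) =====
-- def _rev(x):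
--     # reverse the decimal digits in a single accumulator pass (no digit list)
--     r = 0
--     while x > 0:
--         r = r * 10 + x % 10
--         x //= 10
--     return r
--
-- def helper(n):
--     if n < 1:
--         return []
--     return [[_rev(i * j) for j in range(1, i + 1)] for i in range(1, n + 1)]
-- ===== Notes on version B (the rewrite author's own statement) =====
-- stated objective: simpler
-- what changed: The digit reversal drops A's two-phase helper (collect digits into a list, then fold it back) for a single accumulator loop, and the triangular table is built by nested comprehensions instead of explicit append loops.
import Mathlib
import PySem

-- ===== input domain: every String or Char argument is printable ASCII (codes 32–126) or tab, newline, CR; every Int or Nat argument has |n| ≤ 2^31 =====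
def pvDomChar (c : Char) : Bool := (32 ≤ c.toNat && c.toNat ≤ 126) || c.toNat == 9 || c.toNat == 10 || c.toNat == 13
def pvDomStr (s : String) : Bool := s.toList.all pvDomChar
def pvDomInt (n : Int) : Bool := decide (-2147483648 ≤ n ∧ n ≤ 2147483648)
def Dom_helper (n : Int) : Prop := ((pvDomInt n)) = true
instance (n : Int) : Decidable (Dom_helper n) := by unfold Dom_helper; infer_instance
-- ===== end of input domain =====

-- B replaces A's two-phase digit reversal (collect a digit list, then fold it) by a single
-- accumulator loop, and builds the triangular table by nested maps instead of append loops. (objective: simpler)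

-- ===== PORT A =====
-- while n > 0: temp.append(n % 10); n = n // 10
def pvDigitsA (n : Int) (temp : List Int) : List Int :=
  if h : 0 < n then
    pvDigitsA (PySem.Int.floordiv n 10) (temp ++ [PySem.Int.mod n 10])
  else temp
termination_by n.toNat
decreasing_by
  rw [PySem.Int.floordiv_eq_ediv_of_pos (by omega : (0:Int) < 10)]
  omega

def getRev_num (n : Int) : Int :=
  if n < 10 then n
  else
    let temp := pvDigitsA n []
    temp.foldl (fun res num => res * 10 + num) 0

-- while j <= i: temp.append(getRev_num(j * i)); j += 1
def pvRowA (i j : Int) (temp : List Int) : List Int :=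
  if h : j ≤ i then
    pvRowA i (j + 1) (temp ++ [getRev_num (j * i)])
  else temp
termination_by (i + 1 - j).toNat
decreasing_by omega

def helper (n : Int) : List (List Int) :=
  if n < 1 then []
  else (PySem.List.pyRange 1 (n + 1) 1).foldl (fun res i => res ++ [pvRowA i 1 []]) []

-- ===== PORT B =====
-- while x > 0: r = r * 10 + x % 10; x //= 10
def pvRevGo (x r : Int) : Int :=
  if h : 0 < x then
    pvRevGo (PySem.Int.floordiv x 10) (r * 10 + PySem.Int.mod x 10)
  else r
termination_by x.toNat
decreasing_by
  rw [PySem.Int.floordiv_eq_ediv_of_pos (by omega : (0:Int) < 10)]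
  omega

def pvRev (x : Int) : Int := pvRevGo x 0

def helper_alt (n : Int) : List (List Int) :=
  if n < 1 then []
  else (PySem.List.pyRange 1 (n + 1) 1).map (fun i =>
    (PySem.List.pyRange 1 (i + 1) 1).map (fun j => pvRev (i * j)))

-- ===== PRECONDITION & SPEC =====
def Spec_helper (n : Int) (out : List (List Int)) : Prop := out = helper_alt n
instance (n : Int) (out : List (List Int)) : Decidable (Spec_helper n out) := by unfold Spec_helper; infer_instance

-- ===== CLAIM (what is proved, stated in full; the proofs are below) =====
def Claim_equal_helper : Prop := ∀ (n : Int), Dom_helper n → Spec_helper n (helper n)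

-- ===== LEMMAS AND PROOFS =====

-- folding A's little-endian digit list is B's accumulator loop
theorem pvDigitsA_foldl (n : Int) (temp : List Int) (r : Int) :
    (pvDigitsA n temp).foldl (fun res num => res * 10 + num) r
      = pvRevGo n (temp.foldl (fun res num => res * 10 + num) r) := by
  induction n, temp using pvDigitsA.induct
  next n temp h ih =>
    rw [pvDigitsA]
    simp only [h, dif_pos]
    rw [ih]
    conv_rhs => rw [pvRevGo]
    simp [h, List.foldl_append]
  next n temp h =>
    rw [pvDigitsA, pvRevGo]
    simp [h]

theorem getRev_eq (m : Int) (hm : 0 ≤ m) : getRev_num m = pvRev m := by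
  by_cases h : m < 10
  · simp only [getRev_num, h, if_pos, pvRev]
    by_cases h0 : 0 < m
    · have hd : PySem.Int.floordiv m 10 = 0 := by
        rw [PySem.Int.floordiv_eq_ediv_of_pos (by omega : (0:Int) < 10)]
        exact Int.ediv_eq_zero_of_lt hm h
      have hmm : PySem.Int.mod m 10 = m := by
        rw [PySem.Int.mod_eq_emod_of_pos (by omega : (0:Int) < 10)]
        exact Int.emod_eq_of_lt hm h
      rw [pvRevGo]
      simp only [h0, dif_pos, hd, hmm]
      rw [pvRevGo]
      simp
    · have : m = 0 := by omega
      subst this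
      rw [pvRevGo]; simp
  · simp only [getRev_num, h, if_neg, not_false_iff, pvRev]
    simpa using pvDigitsA_foldl m [] 0

theorem pvRowA_eq (i j : Int) (temp : List Int) :
    pvRowA i j temp
      = temp ++ (PySem.List.pyRange j (i + 1) 1).map (fun j' => getRev_num (j' * i)) := by
  induction j, temp using pvRowA.induct i
  next j temp h ih =>
    rw [pvRowA]
    simp only [h, dif_pos]
    rw [ih, PySem.List.pyRange_one_cons (by omega : j < i + 1)]
    simp
  next j temp h =>
    rw [pvRowA, PySem.List.pyRange_one_eq_nil (by omega : i + 1 ≤ j)]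
    simp [h]

-- ===== VERDICT (by name: the statement is the Claim_ definition above) =====
theorem helper_spec : Claim_equal_helper := by
  intro n _
  unfold Spec_helper helper helper_alt
  by_cases hn : n < 1
  · simp [hn]
  · simp only [hn, if_neg, not_false_iff]
    rw [PySem.List.foldl_append_singleton_eq_map]
    apply List.map_congr_left
    intro i hi
    have hi1 : 1 ≤ i := ((PySem.List.mem_pyRange_one).1 hi).1
    rw [pvRowA_eq]
    simp only [List.nil_append]
    apply List.map_congr_left
    intro j hj
    have hj1 : 1 ≤ j := ((PySem.List.mem_pyRange_one).1 hj).1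
    rw [mul_comm, getRev_eq _ (by positivity)]
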